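-- pv_equiv track=rewrite | github.com/TylerMorley/advent-of-code | 2020/d4-1.py | splitPassports
-- ===== SOURCE A (Python) =====
-- def splitPassports(passportFile):
--     passports = []
--     currentPassport = []
--
--     for line in passportFile:
--         if line == '':
--             passports.append(currentPassport)
--             currentPassport = []
--
--         else:
--             fields = [field for field in line.split(' ')]
--             currentPassport += fields
--
--     passports.append(currentPassport)
--
--     return passports
-- ===== SOURCE B (Python) =====
-- def splitPassports(passportFile):
--     lines = list(passportFile)
--     groups = []
--     while True:
--         try:
--             i = lines.index('')
--         except ValueError:
--             groups.append(lines)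
--             break
--         groups.append(lines[:i])
--         lines = lines[i + 1:]
--     return [[f for line in grp for f in line.split(' ')] for grp in groups]
-- ===== Notes on version B (the rewrite author's own statement) =====
-- stated objective: alternative
-- what changed: A builds passports in one stateful pass with a current-passport field accumulator; B first cuts the raw lines into groups by repeatedly locating the next blank line with list.index and slicing, then flattens each group's line.split(' ') fields in a separate map pass.
import Mathlib
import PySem

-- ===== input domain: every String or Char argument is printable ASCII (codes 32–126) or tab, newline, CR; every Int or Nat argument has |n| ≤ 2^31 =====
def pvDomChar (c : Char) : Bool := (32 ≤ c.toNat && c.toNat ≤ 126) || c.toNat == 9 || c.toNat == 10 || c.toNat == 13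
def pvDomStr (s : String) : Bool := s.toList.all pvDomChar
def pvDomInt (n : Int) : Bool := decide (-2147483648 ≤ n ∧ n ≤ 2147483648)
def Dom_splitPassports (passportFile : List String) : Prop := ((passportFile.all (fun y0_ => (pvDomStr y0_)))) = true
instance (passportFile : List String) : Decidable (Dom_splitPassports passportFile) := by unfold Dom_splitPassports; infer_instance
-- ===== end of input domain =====

-- B replaces A's single stateful field accumulator with repeated index-of-blank slicing into raw
-- line groups followed by a map that flattens each group's fields (objective: alternative decomposition).

-- both sources call line.split(' '); sep ' ' is nonempty so Python's split always returns (split? = some)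
def pvSplitSp (line : String) : List String := (PySem.Str.split? line " ").getD []

-- ===== PORT A =====
def splitPassports (passportFile : List String) : List (List String) :=
  let st := passportFile.foldl
    (fun (st : List (List String) × List String) line =>
      if line == "" then (st.1 ++ [st.2], ([] : List String))
      else (st.1, st.2 ++ pvSplitSp line))
    (([], []) : List (List String) × List String)
  st.1 ++ [st.2]

-- ===== PORT B =====
-- the while-loop of Source B: cut off the prefix before the first '' until none is left
def pvAltLoop (lines : List String) (groups : List (List String)) : List (List String) :=
  match h : PySem.List.index? lines "" with
  | none => groups ++ [lines]
  | some i =>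
      pvAltLoop (PySem.List.slice lines (some ((i : Int) + 1)) none)
        (groups ++ [PySem.List.slice lines none (some (i : Int))])
termination_by lines.length
decreasing_by
  have hmem : "" ∈ lines := (PySem.List.index?_isSome_iff lines "").mp (by rw [h]; rfl)
  have : (i : Int) + 1 = ((i + 1 : Nat) : Int) := by push_cast; ring
  rw [this, PySem.List.slice_from_natCast]
  have hlen : 0 < lines.length := List.length_pos_of_mem hmem
  simp [List.length_drop]
  omega

def splitPassports_alt (passportFile : List String) : List (List String) :=
  (pvAltLoop passportFile []).map (fun grp => grp.flatMap (fun line => pvSplitSp line))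

-- ===== PRECONDITION & SPEC =====
def Spec_splitPassports (passportFile : List String) (out : List (List String)) : Prop := out = splitPassports_alt passportFile
instance (passportFile : List String) (out : List (List String)) : Decidable (Spec_splitPassports passportFile out) := by unfold Spec_splitPassports; infer_instance

-- ===== CLAIM (what is proved, stated in full; the proofs are below) =====
def Claim_equal_splitPassports : Prop := ∀ (passportFile : List String), Dom_splitPassports passportFile → Spec_splitPassports passportFile (splitPassports passportFile)

-- ===== LEMMAS AND PROOFS =====

-- canonical blank-separated grouping of the raw lines
def pvBlocks : List String → List (List String)
  | [] => [[]]
  | l :: ls =>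
      if l = "" then [] :: pvBlocks ls
      else
        match pvBlocks ls with
        | g :: gs => (l :: g) :: gs
        | [] => [[l]]

theorem pvBlocks_ne_nil (ls : List String) : pvBlocks ls ≠ [] := by
  induction ls with
  | nil => simp [pvBlocks]
  | cons l ls ih =>
      simp only [pvBlocks]
      split_ifs
      · simp
      · cases h : pvBlocks ls <;> simp

theorem pvBlocks_no_blank (ls : List String) (h : "" ∉ ls) : pvBlocks ls = [ls] := by
  induction ls with
  | nil => simp [pvBlocks]
  | cons l ls ih =>
      simp only [List.mem_cons, not_or] at h
      simp [pvBlocks, Ne.symm h.1, ih h.2]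

theorem pvBlocks_append_blank (pre suf : List String) (h : "" ∉ pre) :
    pvBlocks (pre ++ "" :: suf) = pre :: pvBlocks suf := by
  induction pre with
  | nil => simp [pvBlocks]
  | cons p pre ih =>
      simp only [List.mem_cons, not_or] at h
      simp [pvBlocks, Ne.symm h.1, ih h.2]

theorem pvAltLoop_eq (lines : List String) (groups : List (List String)) :
    pvAltLoop lines groups = groups ++ pvBlocks lines := by
  induction hn : lines.length using Nat.strong_induction_on generalizing lines groups with
  | _ n ih =>
  rw [pvAltLoop]
  split
  next h =>
      have : "" ∉ lines := (PySem.List.index?_eq_none_iff lines "").mp h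
      simp [pvBlocks_no_blank lines this]
  next i h =>
      obtain ⟨pre, suf, hp, hplen, hnm⟩ := (PySem.List.index?_eq_some_iff lines "" i).mp h
      subst hp
      subst hplen
      have h1 : (pre.length : Int) + 1 = ((pre.length + 1 : Nat) : Int) := by push_cast; ring
      have htake : (pre ++ "" :: suf).take pre.length = pre := by simp
      have hdrop : (pre ++ "" :: suf).drop (pre.length + 1) = suf := by
        rw [show pre.length + 1 = (pre ++ [""]).length by simp,
          show pre ++ "" :: suf = (pre ++ [""]) ++ suf by simp, List.drop_left]
      have hlt : suf.length < n := by
        rw [← hn]; simp only [List.length_append, List.length_cons]; omega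
      rw [h1, PySem.List.slice_from_natCast, PySem.List.slice_to_natCast, htake, hdrop]
      rw [ih suf.length hlt suf _ rfl]
      rw [pvBlocks_append_blank pre suf hnm]
      simp

-- A's loop invariant: the final passports list is the pending ones plus the flattened blocks,
-- with the current partial passport prefixed onto the first block
theorem pvFoldA (ls : List String) (ps : List (List String)) (cur : List String) :
    (ls.foldl
        (fun (st : List (List String) × List String) line =>
          if line == "" then (st.1 ++ [st.2], ([] : List String))
          else (st.1, st.2 ++ pvSplitSp line))
        (ps, cur)).1 ++
      [(ls.foldl
        (fun (st : List (List String) × List String) line =>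
          if line == "" then (st.1 ++ [st.2], ([] : List String))
          else (st.1, st.2 ++ pvSplitSp line))
        (ps, cur)).2] =
    ps ++ (match (pvBlocks ls).map (fun grp => grp.flatMap (fun line => pvSplitSp line)) with
           | g :: gs => (cur ++ g) :: gs
           | [] => [cur]) := by
  induction ls generalizing ps cur with
  | nil => simp [pvBlocks]
  | cons l ls ih =>
      simp only [List.foldl_cons, pvBlocks, beq_iff_eq]
      simp only [beq_iff_eq] at ih
      by_cases hl : l = ""
      · subst hl
        simp only [ite_true]
        rw [ih]
        cases h : (pvBlocks ls).map (fun grp => grp.flatMap (fun line => pvSplitSp line)) with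
        | nil => exact absurd (List.map_eq_nil_iff.mp h) (pvBlocks_ne_nil ls)
        | cons g gs => simp [h]
      · simp only [if_neg hl]
        rw [ih]
        cases hb : pvBlocks ls with
        | nil => exact absurd hb (pvBlocks_ne_nil ls)
        | cons g gs => simp [List.append_assoc]

-- ===== VERDICT (by name: the statement is the Claim_ definition above) =====
theorem splitPassports_spec : Claim_equal_splitPassports := by
  intro pf _
  show splitPassports pf = splitPassports_alt pf
  rw [splitPassports_alt, pvAltLoop_eq, List.nil_append, splitPassports]
  rw [pvFoldA pf [] []]
  cases h : (pvBlocks pf).map (fun grp => grp.flatMap (fun line => pvSplitSp line)) with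
  | nil => exact absurd (List.map_eq_nil_iff.mp h) (pvBlocks_ne_nil pf)
  | cons g gs => simp
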